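-- pv_equiv track=rewrite | github.com/NishkaAwasthi/solo_pink | implementation/simpleSolitaire.py | recurse
-- ===== SOURCE A (Python) =====
-- def recurse(hand):
--     if len(hand) >= 4:
--         for i in range(len(hand)-1,2,-1):
--             # value
--             if hand[i][0] == hand[i-3][0]:
--                 del hand[i-3]
--                 del hand[i-3]
--                 del hand[i-3]
--                 del hand[i-3]
--                 return recurse(hand)
--
--         for i in range(len(hand)-1,2,-1):
--             # suit
--             if hand[i][1] == hand[i-3][1]:
--                 del hand[i-3]
--                 del hand[i-1]
--                 return recurse(hand)
--     return hand
-- ===== SOURCE B (Python) =====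
-- def recurse(hand):
--     # Mutates hand in place (like the original) and returns it.
--     while len(hand) >= 4:
--         n = len(hand)
--         i = max((j for j in range(3, n) if hand[j][0] == hand[j-3][0]), default=-1)
--         if i >= 0:
--             hand[i-3:i+1] = []
--             continue
--         i = max((j for j in range(3, n) if hand[j][1] == hand[j-3][1]), default=-1)
--         if i < 0:
--             break
--         hand[i-3:i+1] = hand[i-2:i]
--     return hand
-- ===== Notes on version B (the rewrite author's own statement) =====
-- stated objective: alternative
-- what changed: Replaces A's tail-recursive restart with two descending first-match scans by an in-place while loop that finds the maximal matching index via an ascending max-scan per rule and deletes by slice assignment instead of repeated del.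
import Mathlib
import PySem

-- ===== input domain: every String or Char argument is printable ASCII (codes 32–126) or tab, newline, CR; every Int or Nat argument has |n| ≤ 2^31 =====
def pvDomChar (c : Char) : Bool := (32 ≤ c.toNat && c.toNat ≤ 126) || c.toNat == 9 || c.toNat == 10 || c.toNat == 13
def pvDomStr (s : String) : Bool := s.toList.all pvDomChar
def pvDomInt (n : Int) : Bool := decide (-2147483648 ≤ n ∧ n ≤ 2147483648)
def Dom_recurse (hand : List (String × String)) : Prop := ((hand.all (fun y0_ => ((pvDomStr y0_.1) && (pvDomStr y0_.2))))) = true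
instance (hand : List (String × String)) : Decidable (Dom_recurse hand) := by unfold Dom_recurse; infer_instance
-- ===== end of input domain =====

-- B replaces A's tail-recursive restart (two descending first-match scans, four repeated `del`s)
-- by an in-place while loop that finds the MAXIMAL matching index with one ascending max-scan per
-- rule and deletes by slice assignment (objective: alternative).  Both Pythons mutate `hand` in
-- place and return it; the equivalence proved here is about the return value.
-- Both ports run their recursion/loop on fuel `hand.length`, a pure totality guard: every round
-- removes at least two cards and stops below four, so the fuel can never be exhausted.

-- ===== PORT A =====

-- `for i in range(len(hand)-1, 2, -1): if p(i): …` — first index i (descending, down to 3) with p i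
def findDesc (p : Nat → Bool) : Nat → Option Nat
  | 0 => none
  | 1 => none
  | 2 => none
  | (i+3) => if p (i+3) then some (i+3) else findDesc p (i+2)

-- hand[i] for 0 ≤ i < len(hand) (every index A reads is in range, so getD is exact)
def pvCard (hand : List (String × String)) (i : Nat) : String × String := hand.getD i ("", "")

def recurseAux : Nat → List (String × String) → List (String × String)
  | 0, hand => hand
  | (fuel+1), hand =>
    if 4 ≤ hand.length then
      match findDesc (fun i => (pvCard hand i).1 == (pvCard hand (i-3)).1) (hand.length - 1) with
      | some i =>
          recurseAux fuel ((((hand.eraseIdx (i-3)).eraseIdx (i-3)).eraseIdx (i-3)).eraseIdx (i-3))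
      | none =>
        match findDesc (fun i => (pvCard hand i).2 == (pvCard hand (i-3)).2) (hand.length - 1) with
        | some i => recurseAux fuel ((hand.eraseIdx (i-3)).eraseIdx (i-1))
        | none => hand
    else hand

def recurse (hand : List (String × String)) : List (String × String) :=
  recurseAux hand.length hand

-- ===== PORT B =====

-- hand[j] on B's side (B reads the same in-range indices)
def pvCardB (hand : List (String × String)) (j : Nat) : String × String := hand.getD j ("", "")

-- `max((j for j in range(3, n) if p(j)), default=-1)` — ascending fold keeping the max match
def findMaxIdx (p : Nat → Bool) (n : Nat) : Int :=
  (List.range' 3 (n - 3)).foldl (fun best j => if p j then max best (j : Int) else best) (-1)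

-- `i = max((j for j in range(3, n) if hand[j][0] == hand[j-3][0]), default=-1)` (value rule)
def valHit (hand : List (String × String)) : Int :=
  findMaxIdx (fun j => (pvCardB hand j).1 == (pvCardB hand (j-3)).1) hand.length

-- the suit-rule counterpart
def suitHit (hand : List (String × String)) : Int :=
  findMaxIdx (fun j => (pvCardB hand j).2 == (pvCardB hand (j-3)).2) hand.length

def recurseAltAux : Nat → List (String × String) → List (String × String)
  | 0, hand => hand
  | (fuel+1), hand =>
    if 4 ≤ hand.length then
      if valHit hand ≥ 0 then
        -- hand[i-3:i+1] = []  (slice assignment, ported by hand; the indices are in range here)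
        recurseAltAux fuel
          (hand.take ((valHit hand).toNat - 3) ++ hand.drop ((valHit hand).toNat + 1))
      else if suitHit hand ≥ 0 then
        -- hand[i-3:i+1] = hand[i-2:i]  (slice assignment, ported by hand; indices in range here)
        recurseAltAux fuel
          (hand.take ((suitHit hand).toNat - 3) ++
            (hand.drop ((suitHit hand).toNat - 2)).take 2 ++ hand.drop ((suitHit hand).toNat + 1))
      else hand
    else hand

def recurse_alt (hand : List (String × String)) : List (String × String) :=
  recurseAltAux hand.length hand

-- ===== PRECONDITION & SPEC =====
def Spec_recurse (hand : List (String × String)) (out : List (String × String)) : Prop := out = recurse_alt hand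
instance (hand : List (String × String)) (out : List (String × String)) : Decidable (Spec_recurse hand out) := by unfold Spec_recurse; infer_instance

-- ===== CLAIM (what is proved, stated in full; the proofs are below) =====
def Claim_equal_recurse : Prop := ∀ (hand : List (String × String)), Dom_recurse hand → Spec_recurse hand (recurse hand)

-- ===== LEMMAS AND PROOFS =====

theorem findDesc_some_bounds (p : Nat → Bool) : ∀ n i, findDesc p n = some i → 3 ≤ i ∧ i ≤ n := by
  intro n
  induction n using Nat.strong_induction_on with
  | _ n ih =>
    intro i h
    match n with
    | 0 => simp [findDesc] at h
    | 1 => simp [findDesc] at h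
    | 2 => simp [findDesc] at h
    | (m+3) =>
      rw [findDesc] at h
      split at h
      · cases h; omega
      · have := ih (m+2) (by omega) i h; omega

theorem findMaxIdx_bounds (p : Nat → Bool) (n : Nat) :
    -1 ≤ findMaxIdx p n ∧ findMaxIdx p n < n ∧
      (0 ≤ findMaxIdx p n → 3 ≤ findMaxIdx p n) := by
  unfold findMaxIdx
  have main : ∀ (l : List Nat) (b : Int), (∀ j ∈ l, 3 ≤ j ∧ j < n) → -1 ≤ b → b < n → (0 ≤ b → 3 ≤ b) →
      -1 ≤ l.foldl (fun best j => if p j then max best (j : Int) else best) b ∧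
      l.foldl (fun best j => if p j then max best (j : Int) else best) b < n ∧
      (0 ≤ l.foldl (fun best j => if p j then max best (j : Int) else best) b →
        3 ≤ l.foldl (fun best j => if p j then max best (j : Int) else best) b) := by
    intro l
    induction l with
    | nil => intro b _ h1 h2 h3; exact ⟨h1, h2, h3⟩
    | cons x xs ih =>
      intro b hmem h1 h2 h3
      simp only [List.foldl_cons]
      have hx := hmem x (by simp)
      apply ih
      · intro j hj; exact hmem j (by simp [hj])
      · split_ifs <;> omega
      · split_ifs <;> omega
      · split_ifs <;> omega
  apply main
  · intro j hj
    rw [List.mem_range'] at hj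
    omega
  all_goals omega

-- the ascending max-scan finds exactly the first match of the descending scan
theorem findMaxIdx_eq_findDesc (p : Nat → Bool) (n : Nat) :
    findMaxIdx p n = (findDesc p (n-1)).elim (-1 : Int) (fun i => (i : Int)) := by
  induction n with
  | zero => simp [findMaxIdx, findDesc]
  | succ m ih =>
    by_cases hm : m ≤ 2
    · interval_cases m <;> simp [findMaxIdx, findDesc, List.range']
    · have hm3 : 3 ≤ m := by omega
      have hrange : List.range' 3 (m + 1 - 3) = List.range' 3 (m - 3) ++ [3 + (m - 3)] := by
        rw [show m + 1 - 3 = (m - 3) + 1 from by omega, List.range'_1_concat]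
      have hstep : findMaxIdx p (m+1)
          = (if p m then max (findMaxIdx p m) (m : Int) else findMaxIdx p m) := by
        unfold findMaxIdx
        rw [hrange, List.foldl_append]
        rw [show 3 + (m - 3) = m from by omega]
        simp
      obtain ⟨hb1, hb2, hb3⟩ := findMaxIdx_bounds p m
      have hdesc : findDesc p m = if p m then some m else findDesc p (m-1) := by
        obtain ⟨k, hk⟩ : ∃ k, m = k + 3 := ⟨m - 3, by omega⟩
        subst hk
        rw [findDesc]
        rfl
      rw [hstep, show (m+1)-1 = m from rfl, hdesc]
      by_cases hp : p m
      · simp only [hp, if_true, Option.elim]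
        exact max_eq_right (le_of_lt hb2)
      · simp only [hp]
        exact ih

-- eraseIdx at position |L| + j inside L ++ M erases inside M
theorem eraseIdx_append_add {α : Type} (L M : List α) (k j : Nat) (h : k = L.length + j) :
    (L ++ M).eraseIdx k = L ++ M.eraseIdx j := by
  induction L generalizing k with
  | nil => simp at h; simp [h]
  | cons a L ih =>
    subst h
    simp only [List.cons_append, List.length_cons]
    rw [show L.length + 1 + j = (L.length + j) + 1 from by omega]
    rw [List.eraseIdx_cons_succ, ih _ rfl]

-- deleting hand[i-3] four times removes the four cards i-3 … i
theorem erase4_eq (hand : List (String × String)) (i : Nat) (h3 : 3 ≤ i) (hi : i < hand.length) :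
    ((((hand.eraseIdx (i-3)).eraseIdx (i-3)).eraseIdx (i-3)).eraseIdx (i-3))
      = hand.take (i-3) ++ hand.drop (i+1) := by
  obtain ⟨a, b, c, d, rest, hsplit⟩ :
      ∃ a b c d rest, hand.drop (i-3) = a :: b :: c :: d :: rest := by
    have hlen : 4 ≤ (hand.drop (i-3)).length := by
      simp [List.length_drop]; omega
    match hdd : hand.drop (i-3) with
    | [] => simp [hdd] at hlen
    | [a] => simp [hdd] at hlen
    | [a, b] => simp [hdd] at hlen
    | [a, b, c] => simp [hdd] at hlen
    | a :: b :: c :: d :: rest => exact ⟨a, b, c, d, rest, rfl⟩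
  have hhand : hand = hand.take (i-3) ++ (a :: b :: c :: d :: rest) := by
    conv_lhs => rw [← List.take_append_drop (i-3) hand, hsplit]
  have htl : (hand.take (i-3)).length = i - 3 := by
    simp [List.length_take]; omega
  have hdrop : hand.drop (i+1) = rest := by
    rw [show i + 1 = (i-3) + 4 from by omega, ← List.drop_drop, hsplit]
    rfl
  conv_lhs => rw [hhand]
  rw [eraseIdx_append_add _ _ _ 0 (by omega), List.eraseIdx_cons_zero,
      eraseIdx_append_add _ _ _ 0 (by omega), List.eraseIdx_cons_zero,
      eraseIdx_append_add _ _ _ 0 (by omega), List.eraseIdx_cons_zero,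
      eraseIdx_append_add _ _ _ 0 (by omega), List.eraseIdx_cons_zero,
      hdrop]

-- deleting hand[i-3] then hand[i-1] keeps cards i-2, i-1 and removes i-3 and i
theorem erase2_eq (hand : List (String × String)) (i : Nat) (h3 : 3 ≤ i) (hi : i < hand.length) :
    (hand.eraseIdx (i-3)).eraseIdx (i-1)
      = hand.take (i-3) ++ (hand.drop (i-2)).take 2 ++ hand.drop (i+1) := by
  obtain ⟨a, b, c, d, rest, hsplit⟩ :
      ∃ a b c d rest, hand.drop (i-3) = a :: b :: c :: d :: rest := by
    have hlen : 4 ≤ (hand.drop (i-3)).length := by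
      simp [List.length_drop]; omega
    match hdd : hand.drop (i-3) with
    | [] => simp [hdd] at hlen
    | [a] => simp [hdd] at hlen
    | [a, b] => simp [hdd] at hlen
    | [a, b, c] => simp [hdd] at hlen
    | a :: b :: c :: d :: rest => exact ⟨a, b, c, d, rest, rfl⟩
  have hhand : hand = hand.take (i-3) ++ (a :: b :: c :: d :: rest) := by
    conv_lhs => rw [← List.take_append_drop (i-3) hand, hsplit]
  have htl : (hand.take (i-3)).length = i - 3 := by
    simp [List.length_take]; omega
  have hdrop : hand.drop (i+1) = rest := by
    rw [show i + 1 = (i-3) + 4 from by omega, ← List.drop_drop, hsplit]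
    rfl
  have hmid : (hand.drop (i-2)).take 2 = [b, c] := by
    rw [show i - 2 = (i-3) + 1 from by omega, ← List.drop_drop, hsplit]
    rfl
  conv_lhs => rw [hhand]
  rw [eraseIdx_append_add _ _ _ 0 (by omega), List.eraseIdx_cons_zero,
      eraseIdx_append_add _ (b :: c :: d :: rest) (i-1) 2 (by omega)]
  rw [hdrop, hmid]
  simp [List.eraseIdx]

theorem recurseAux_eq_altAux : ∀ (fuel : Nat) (hand : List (String × String)),
    recurseAux fuel hand = recurseAltAux fuel hand := by
  intro fuel
  induction fuel with
  | zero => intro hand; rfl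
  | succ f ih =>
    intro hand
    rw [recurseAux, recurseAltAux]
    by_cases h4 : 4 ≤ hand.length
    · rw [if_pos h4, if_pos h4]
      cases hv : findDesc (fun i => (pvCard hand i).1 == (pvCard hand (i-3)).1) (hand.length - 1) with
      | some i =>
        obtain ⟨hb3, hbn⟩ := findDesc_some_bounds _ _ _ hv
        have hlink : valHit hand = (i : Int) := by
          unfold valHit
          rw [show pvCardB = pvCard from rfl, findMaxIdx_eq_findDesc, hv]
          rfl
        rw [if_pos (by rw [hlink]; omega), hlink]
        simp only [Int.toNat_natCast]
        rw [← erase4_eq hand i hb3 (by omega)]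
        exact ih _
      | none =>
        have hlinkv : valHit hand = -1 := by
          unfold valHit
          rw [show pvCardB = pvCard from rfl, findMaxIdx_eq_findDesc, hv]
          rfl
        rw [if_neg (by rw [hlinkv]; omega)]
        cases hs : findDesc (fun i => (pvCard hand i).2 == (pvCard hand (i-3)).2) (hand.length - 1) with
        | some i =>
          obtain ⟨hb3, hbn⟩ := findDesc_some_bounds _ _ _ hs
          have hlinks : suitHit hand = (i : Int) := by
            unfold suitHit
            rw [show pvCardB = pvCard from rfl, findMaxIdx_eq_findDesc, hs]
            rfl
          rw [if_pos (by rw [hlinks]; omega), hlinks]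
          simp only [Int.toNat_natCast]
          rw [← erase2_eq hand i hb3 (by omega)]
          exact ih _
        | none =>
          have hlinks : suitHit hand = -1 := by
            unfold suitHit
            rw [show pvCardB = pvCard from rfl, findMaxIdx_eq_findDesc, hs]
            rfl
          rw [if_neg (by rw [hlinks]; omega)]
    · rw [if_neg h4, if_neg h4]

-- ===== VERDICT (by name: the statement is the Claim_ definition above) =====
theorem recurse_spec : Claim_equal_recurse := by
  intro hand _
  unfold Spec_recurse recurse recurse_alt
  exact recurseAux_eq_altAux hand.length hand
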